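-- pv_equiv track=rewrite | github.com/soumilm/tiling | 1xnVisual.py | getValid
-- ===== SOURCE A (Python) =====
-- def checkRepeat(arr, config):
--   for i in arr:
--     n = len(i)
--     running = True
--     for j in range(0, n):
--       if i[j] != config[n-1-j]:
--         running = False
--         break
--     if running:
--       return True
--   return False
--
-- def getValid(blocks, cuts):
--   arr = [];
--   num = blocks - 1;
--   for i in range(0, 2**num):
--     k = i
--     rep = [0]*num
--     j = 0
--     cutsSoFar = 0
--     while (k > 0):
--       bit = k%2
--       cutsSoFar += bit
--       rep[j] = bit
--       k = k//2
--       j += 1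
--     if (cutsSoFar == cuts and not checkRepeat(arr, rep)):
--       arr.append(rep)
--   return arr
-- ===== SOURCE B (Python) =====
-- def getValid(blocks, cuts):
--     num = blocks - 1
--     out = []
--     for i in range(2 ** num):
--         t = i
--         r = 0
--         ones = 0
--         bits = []
--         for _ in range(num):
--             b = t % 2
--             bits.append(b)
--             r = 2 * r + b
--             ones += b
--             t //= 2
--         # i survives A's reversal-dedup iff its bit-reversal r is not a
--         # smaller index: no scan of the output list needed.
--         if ones == cuts and r >= i:
--             out.append(bits)
--     return out
-- ===== Notes on version B (the rewrite author's own statement) =====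
-- stated objective: alternative
-- what changed: B replaces A's per-candidate reversal scan of the growing output list (checkRepeat) by a closed-form test: a pattern i is kept iff its bit-reversal r satisfies r >= i, computed in the same single pass that extracts the bits.
import Mathlib
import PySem

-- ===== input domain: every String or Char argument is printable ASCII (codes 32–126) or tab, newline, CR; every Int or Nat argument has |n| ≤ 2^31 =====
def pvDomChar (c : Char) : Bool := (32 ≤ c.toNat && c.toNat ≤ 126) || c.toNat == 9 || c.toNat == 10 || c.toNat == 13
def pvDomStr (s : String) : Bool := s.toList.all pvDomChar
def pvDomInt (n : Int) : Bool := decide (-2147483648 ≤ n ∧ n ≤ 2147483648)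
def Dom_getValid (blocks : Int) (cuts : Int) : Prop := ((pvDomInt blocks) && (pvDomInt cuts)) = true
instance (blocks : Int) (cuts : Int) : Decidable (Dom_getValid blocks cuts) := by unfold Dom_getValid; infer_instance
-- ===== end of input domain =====

-- B replaces A's reversal-dedup scan of the growing output list by a closed
-- bit-reversal comparison (keep i iff its bit-reversal r satisfies r >= i) in one pass.


-- ===== PORT A =====
-- inner 'for j in range(0, n)' loop of checkRepeat with its break;
-- both indexings are in range in every call getValid makes (all lists have length num),
-- so the '.getD 0' after pyGet? is exact there
def crLoop (elem config : List Int) (n : Int) (j : Int) : Bool :=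
  if _h : j < n then
    if (PySem.List.pyGet? elem j).getD 0 ≠ (PySem.List.pyGet? config (n - 1 - j)).getD 0 then
      false
    else
      crLoop elem config n (j + 1)
  else true
  termination_by (n - j).toNat
  decreasing_by omega

def checkRepeat (arr : List (List Int)) (config : List Int) : Bool :=
  match arr with
  | [] => false
  | i :: rest =>
      if crLoop i config ((i.length : Int)) 0 then true
      else checkRepeat rest config

-- the 'while (k > 0)' loop; 'rep[j] = bit' is in range in every reachable call
-- (k > 0 implies j < len(rep)), so List.set is exact there
def whileA (k : Int) (rep : List Int) (j : Nat) (c : Int) : List Int × Int :=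
  if _h : 0 < k then
    whileA (PySem.Int.floordiv k 2) (rep.set j (PySem.Int.mod k 2)) (j + 1) (c + PySem.Int.mod k 2)
  else (rep, c)
  termination_by k.toNat
  decreasing_by
    rw [PySem.Int.floordiv_eq_ediv_of_pos (by omega : (0:Int) < 2)]; omega

def stepA (cuts : Int) (num : Nat) (arr : List (List Int)) (i : Int) : List (List Int) :=
  let p := whileA i (List.replicate num 0) 0 0
  if decide (p.2 = cuts) && !(checkRepeat arr p.1) then arr ++ [p.1] else arr

-- '2**num' : num ≥ 0 on every input where the Python returns (Pre_), where 2 ^ num.toNat is exact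
def getValid (blocks : Int) (cuts : Int) : List (List Int) :=
  let num := blocks - 1
  (PySem.List.pyRange 0 ((2:Int) ^ num.toNat) 1).foldl (stepA cuts num.toNat) []

-- ===== PORT B =====
-- the inner 'for _ in range(num)' loop of Source B; state (t, r, ones, bits)
def innerB (t r ones : Int) (bits : List Int) : Nat → Int × Int × List Int
  | 0 => (r, ones, bits)
  | n + 1 =>
      let b := PySem.Int.mod t 2
      innerB (PySem.Int.floordiv t 2) (2 * r + b) (ones + b) (bits ++ [b]) n

def stepB (cuts : Int) (num : Nat) (out : List (List Int)) (i : Int) : List (List Int) :=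
  let p := innerB i 0 0 [] num
  if decide (p.2.1 = cuts) && decide (i ≤ p.1) then out ++ [p.2.2] else out

def getValid_alt (blocks : Int) (cuts : Int) : List (List Int) :=
  let num := blocks - 1
  (PySem.List.pyRange 0 ((2:Int) ^ num.toNat) 1).foldl (stepB cuts num.toNat) []

-- ===== PRECONDITION & SPEC =====
-- Pre_ excludes exactly blocks ≤ 0, where Python A raises TypeError (2**negative is a float,
-- which range() rejects); B raises there too.
def Pre_getValid (blocks : Int) (cuts : Int) : Prop := 1 ≤ blocks
instance (blocks : Int) (cuts : Int) : Decidable (Pre_getValid blocks cuts) := by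
  unfold Pre_getValid; infer_instance

def pvWitness_getValid : Int × Int := (4, 2)

def Spec_getValid (blocks : Int) (cuts : Int) (out : List (List Int)) : Prop := out = getValid_alt blocks cuts
instance (blocks : Int) (cuts : Int) (out : List (List Int)) : Decidable (Spec_getValid blocks cuts out) := by unfold Spec_getValid; infer_instance

-- ===== CLAIM (what is proved, stated in full; the proofs are below) =====
def Claim_equal_getValid : Prop := ∀ (blocks : Int) (cuts : Int), Dom_getValid blocks cuts → Pre_getValid blocks cuts → Spec_getValid blocks cuts (getValid blocks cuts)

-- ===== LEMMAS AND PROOFS =====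

-- LSB-first list of the low m bits of k (the value both inner loops build)
def bitsN : Nat → Nat → List Int
  | _, 0 => []
  | k, m + 1 => ((k % 2 : Nat) : Int) :: bitsN (k / 2) m

-- value of an LSB-first bit list
def ofB : List Int → Int := List.foldr (fun b a => b + 2 * a) 0

-- bit-reversal of k within m bits
def revN (m k : Nat) : Nat := (ofB ((bitsN k m).reverse)).toNat

def keepB (cuts : Int) (m k : Nat) : Bool :=
  decide ((bitsN k m).sum = cuts) && decide (k ≤ revN m k)

def specList (cuts : Int) (m N : Nat) : List (List Int) :=
  ((List.range N).filter (fun k => keepB cuts m k)).map (fun k => bitsN k m)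

theorem bitsN_length (k m : Nat) : (bitsN k m).length = m := by
  induction m generalizing k with
  | zero => simp [bitsN]
  | succ m ih => simp [bitsN, ih]

theorem bitsN_mem (k m : Nat) : ∀ b ∈ bitsN k m, b = 0 ∨ b = 1 := by
  induction m generalizing k with
  | zero => simp [bitsN]
  | succ m ih =>
      intro b hb
      simp [bitsN] at hb
      rcases hb with h | h
      · omega
      · exact ih _ b h

theorem bitsN_zero (m : Nat) : bitsN 0 m = List.replicate m 0 := by
  induction m with
  | zero => simp [bitsN]
  | succ m ih => simp [bitsN, ih, List.replicate_succ]

theorem ofB_bitsN (k m : Nat) (h : k < 2 ^ m) : ofB (bitsN k m) = k := by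
  induction m generalizing k with
  | zero => interval_cases k <;> simp [bitsN, ofB]
  | succ m ih =>
      have h2 : k / 2 < 2 ^ m := by omega
      simp [bitsN, ofB] at *
      rw [ih _ h2]
      omega

theorem ofB_nonneg (l : List Int) (h : ∀ b ∈ l, b = 0 ∨ b = 1) : 0 ≤ ofB l := by
  induction l with
  | nil => simp [ofB]
  | cons b t ih =>
      have hb := h b (by simp)
      have ht := ih (fun x hx => h x (by simp [hx]))
      simp [ofB] at *
      omega

theorem ofB_lt (l : List Int) (h : ∀ b ∈ l, b = 0 ∨ b = 1) : ofB l < 2 ^ l.length := by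
  induction l with
  | nil => simp [ofB]
  | cons b t ih =>
      have hb := h b (by simp)
      have ht := ih (fun x hx => h x (by simp [hx]))
      simp [ofB, pow_succ] at *
      omega

theorem bitsN_ofB (l : List Int) (h : ∀ b ∈ l, b = 0 ∨ b = 1) :
    bitsN (ofB l).toNat l.length = l := by
  induction l with
  | nil => simp [bitsN]
  | cons b t ih =>
      have hb := h b (by simp)
      have ht : ∀ x ∈ t, x = 0 ∨ x = 1 := fun x hx => h x (by simp [hx])
      have htn := ofB_nonneg t ht
      have : ofB (b :: t) = b + 2 * ofB t := by simp [ofB]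
      rw [this]
      simp only [List.length_cons, bitsN, List.cons.injEq]
      refine ⟨?_, ?_⟩
      · rcases hb with h0 | h1 <;> subst_vars <;> omega
      · have : (b + 2 * ofB t).toNat / 2 = (ofB t).toNat := by
          rcases hb with h0 | h1 <;> subst_vars <;> omega
        rw [this, ih ht]

theorem bitsN_inj (m k k' : Nat) (hk : k < 2 ^ m) (hk' : k' < 2 ^ m)
    (h : bitsN k m = bitsN k' m) : k = k' := by
  have h1 := ofB_bitsN k m hk
  rw [h, ofB_bitsN k' m hk'] at h1
  exact_mod_cast h1.symm

theorem revN_lt (m k : Nat) : revN m k < 2 ^ m := by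
  have h1 : ∀ b ∈ (bitsN k m).reverse, b = 0 ∨ b = 1 := by
    intro b hb; exact bitsN_mem k m b (List.mem_reverse.mp hb)
  have h2 := ofB_lt _ h1
  have h3 := ofB_nonneg _ h1
  rw [List.length_reverse, bitsN_length] at h2
  have hc : ((2:Int) ^ m) = ((2 ^ m : Nat) : Int) := by push_cast; ring
  unfold revN
  omega

theorem bitsN_revN (m k : Nat) (hk : k < 2 ^ m) :
    bitsN (revN m k) m = (bitsN k m).reverse := by
  have h1 : ∀ b ∈ (bitsN k m).reverse, b = 0 ∨ b = 1 := by
    intro b hb; exact bitsN_mem k m b (List.mem_reverse.mp hb)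
  have := bitsN_ofB _ h1
  simpa [bitsN_length, revN] using this

theorem revN_revN (m k : Nat) (hk : k < 2 ^ m) : revN m (revN m k) = k := by
  rw [show revN m (revN m k) = (ofB ((bitsN (revN m k) m).reverse)).toNat from rfl,
    bitsN_revN m k hk, List.reverse_reverse, ofB_bitsN k m hk, Int.toNat_natCast]

theorem sum_bitsN_revN (m k : Nat) (hk : k < 2 ^ m) :
    (bitsN (revN m k) m).sum = (bitsN k m).sum := by
  rw [bitsN_revN m k hk, List.sum_reverse]

theorem set_take_succ (l : List Int) : ∀ (j : Nat) (b : Int), j < l.length →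
    (l.set j b).take (j + 1) = l.take j ++ [b] := by
  induction l with
  | nil => simp
  | cons x xs ih =>
      intro j b hj
      cases j with
      | zero => simp
      | succ j => simp [List.set, ih j b (by simpa using hj)]

theorem set_drop_succ (l : List Int) : ∀ (j : Nat) (b : Int),
    (l.set j b).drop (j + 1) = l.drop (j + 1) := by
  induction l with
  | nil => simp
  | cons x xs ih =>
      intro j b
      cases j with
      | zero => simp
      | succ j => simpa using ih j b

theorem fd2 (k : Nat) : PySem.Int.floordiv (k : Int) 2 = ((k / 2 : Nat) : Int) := by
  rw [PySem.Int.floordiv_eq_ediv_of_pos (by omega : (0:Int) < 2)]; omega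

theorem md2 (k : Nat) : PySem.Int.mod (k : Int) 2 = ((k % 2 : Nat) : Int) := by
  rw [PySem.Int.mod_eq_emod_of_pos (by omega : (0:Int) < 2)]; omega

-- characterization of A's while loop
theorem whileA_eq (p : Nat) : ∀ (k : Nat) (rep : List Int) (j : Nat) (c : Int),
    k < 2 ^ p → rep.length = j + p → (∀ t ∈ rep.drop j, t = (0:Int)) →
    whileA (k : Int) rep j c = (rep.take j ++ bitsN k p, c + (bitsN k p).sum) := by
  induction p with
  | zero =>
      intro k rep j c hk hl _hz
      have hk0 : k = 0 := by omega
      subst hk0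
      rw [whileA, dif_neg (by omega)]
      simp only [bitsN, List.append_nil, List.sum_nil, add_zero]
      rw [List.take_of_length_le (by omega)]
  | succ p ih =>
      intro k rep j c hk hl hz
      by_cases h0 : k = 0
      · subst h0
        rw [whileA, dif_neg (by omega)]
        have hrep : rep.drop j = List.replicate (p + 1) (0:Int) := by
          have := List.eq_replicate_of_mem hz
          rwa [List.length_drop, hl, Nat.add_sub_cancel_left] at this
        have : rep = rep.take j ++ List.replicate (p + 1) (0:Int) := by
          conv_lhs => rw [← List.take_append_drop j rep, hrep]
        rw [bitsN_zero]
        refine Prod.ext ?_ ?_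
        · simpa using this
        · simp
      · have hjl : j < rep.length := by omega
        rw [whileA, dif_pos (by omega : (0:Int) < (k:Int))]
        rw [fd2, md2]
        have hk2 : k / 2 < 2 ^ p := by
          have : 2 ^ (p + 1) = 2 * 2 ^ p := by ring
          omega
        rw [ih (k / 2) (rep.set j ((k % 2 : Nat) : Int)) (j + 1) (c + ((k % 2 : Nat) : Int))
            hk2 (by simp [hl]; omega)
            (by
              intro t ht
              rw [set_drop_succ] at ht
              exact hz t (List.drop_subset_drop_left rep (by omega) ht))]
        rw [set_take_succ rep j _ hjl]
        refine Prod.ext ?_ ?_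
        · simp [bitsN]
        · simp [bitsN]; ring

theorem ofB_append_singleton (l : List Int) (b : Int) :
    ofB (l ++ [b]) = ofB l + b * 2 ^ l.length := by
  induction l with
  | nil => simp [ofB]
  | cons x t ih =>
      simp [ofB] at *
      rw [ih]
      ring

-- characterization of B's inner loop
theorem innerB_eq (p : Nat) : ∀ (k : Nat) (r ones : Int) (bits : List Int),
    k < 2 ^ p →
    innerB (k : Int) r ones bits p =
      (r * 2 ^ p + ofB ((bitsN k p).reverse), ones + (bitsN k p).sum, bits ++ bitsN k p) := by
  induction p with
  | zero =>
      intro k r ones bits hk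
      have : k = 0 := by omega
      subst this
      simp [innerB, bitsN, ofB]
  | succ p ih =>
      intro k r ones bits hk
      have hk2 : k / 2 < 2 ^ p := by
        have : 2 ^ (p + 1) = 2 * 2 ^ p := by ring
        omega
      rw [innerB]
      simp only [fd2, md2]
      rw [ih (k / 2) _ _ _ hk2]
      have hrev : (bitsN k (p + 1)).reverse = (bitsN (k / 2) p).reverse ++ [((k % 2 : Nat) : Int)] := by
        simp [bitsN]
      refine Prod.ext ?_ (Prod.ext ?_ ?_)
      · simp only [hrev, ofB_append_singleton, List.length_reverse, bitsN_length]
        ring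
      · simp [bitsN]; ring
      · simp [bitsN]

theorem crLoop_iff (elem config : List Int) (h : elem.length = config.length) :
    ∀ (d j : Nat), elem.length - j = d →
    (crLoop elem config (elem.length : Int) (j : Int) = true ↔
      ∀ t, j ≤ t → t < elem.length →
        elem.getD t 0 = config.getD (elem.length - 1 - t) 0) := by
  intro d
  induction d with
  | zero =>
      intro j hj
      rw [crLoop, dif_neg (by omega)]
      constructor
      · intro _ t h1 h2; omega
      · intro _; rfl
  | succ d ih =>
      intro j hj
      have hjn : j < elem.length := by omega
      have hjc : elem.length - 1 - j < config.length := by omega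
      rw [crLoop, dif_pos (by exact_mod_cast hjn)]
      have e1 : (PySem.List.pyGet? elem (j : Int)).getD 0 = elem.getD j 0 := by
        rw [PySem.List.pyGet?_of_nonneg _ (by omega)]
        simp [List.getD, List.getElem?_eq_getElem hjn]
      have e2 : ((elem.length : Int) - 1 - (j : Int)) = ((elem.length - 1 - j : Nat) : Int) := by
        omega
      have e3 : (PySem.List.pyGet? config ((elem.length : Int) - 1 - (j : Int))).getD 0
          = config.getD (elem.length - 1 - j) 0 := by
        rw [e2, PySem.List.pyGet?_of_nonneg _ (by omega)]
        simp [List.getD, List.getElem?_eq_getElem hjc]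
      rw [e1, e3]
      by_cases heq : elem.getD j 0 = config.getD (elem.length - 1 - j) 0
      · rw [if_neg (by simpa using heq)]
        have : ((j : Int) + 1) = (((j + 1 : Nat)) : Int) := by omega
        rw [this, ih (j + 1) (by omega)]
        constructor
        · intro H t h1 h2
          rcases Nat.eq_or_lt_of_le h1 with h1 | h1
          · rw [← h1]; exact heq
          · exact H t h1 h2
        · intro H t h1 h2; exact H t (by omega) h2
      · rw [if_pos (by simpa using heq)]
        constructor
        · intro hF; cases hF
        · intro H; exact absurd (H j (le_refl j) hjn) heq

theorem crLoop_eq_rev (elem config : List Int) (h : elem.length = config.length) :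
    crLoop elem config (elem.length : Int) 0 = true ↔ elem = config.reverse := by
  have h0 : ((0 : Int)) = (((0 : Nat)) : Int) := rfl
  rw [h0, crLoop_iff elem config h elem.length 0 (by omega)]
  constructor
  · intro H
    apply List.ext_getElem (by simp [h])
    intro i h1 h2
    have hic : elem.length - 1 - i < config.length := by omega
    have := H i (Nat.zero_le _) h1
    rw [List.getD_eq_getElem _ _ h1, List.getD_eq_getElem _ _ hic] at this
    have hidx : config.length - 1 - i = elem.length - 1 - i := by omega
    simp only [List.getElem_reverse, hidx]
    exact this
  · intro H t _ ht
    subst H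
    have htc : config.reverse.length - 1 - t < config.length := by simp at ht ⊢; omega
    rw [List.getD_eq_getElem _ _ ht, List.getD_eq_getElem _ _ htc]
    simp only [List.getElem_reverse, List.length_reverse]

-- checkRepeat is membership of the reversed config
theorem checkRepeat_eq (arr : List (List Int)) (config : List Int)
    (h : ∀ e ∈ arr, e.length = config.length) :
    checkRepeat arr config = true ↔ config.reverse ∈ arr := by
  induction arr with
  | nil => simp [checkRepeat]
  | cons e rest ih =>
      have he : e.length = config.length := h e (by simp)
      have ihr := ih (fun x hx => h x (by simp [hx]))
      rw [checkRepeat]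
      by_cases hc : crLoop e config ((e.length : Int)) 0 = true
      · rw [if_pos hc]
        have : e = config.reverse := (crLoop_eq_rev e config he).mp hc
        simp [← this]
      · rw [if_neg hc]
        have : ¬ e = config.reverse := fun hx => hc ((crLoop_eq_rev e config he).mpr hx)
        simp [ihr, List.mem_cons]
        intro hx
        exact absurd hx.symm this

theorem keepB_revN (cuts : Int) (m N : Nat) (hN : N < 2 ^ m) :
    keepB cuts m (revN m N) =
      (decide ((bitsN N m).sum = cuts) && decide (revN m N ≤ N)) := by
  unfold keepB
  rw [sum_bitsN_revN m N hN, revN_revN m N hN]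

theorem specList_succ (cuts : Int) (m N : Nat) :
    specList cuts m (N + 1) =
      specList cuts m N ++ (if keepB cuts m N = true then [bitsN N m] else []) := by
  simp only [specList, List.range_succ, List.filter_append, List.map_append]
  congr 1
  by_cases hk : keepB cuts m N = true <;> simp [hk]

theorem len_specList (cuts : Int) (m N : Nat) :
    ∀ e ∈ specList cuts m N, e.length = (bitsN N m).length := by
  intro e he
  simp only [specList, List.mem_map, List.mem_filter] at he
  obtain ⟨j, _, rfl⟩ := he
  simp [bitsN_length]

theorem checkRepeat_specList (cuts : Int) (m N : Nat) (hN : N < 2 ^ m) :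
    (checkRepeat (specList cuts m N) (bitsN N m) = true) ↔
      (revN m N < N ∧ keepB cuts m (revN m N) = true) := by
  rw [checkRepeat_eq _ _ (len_specList cuts m N), ← bitsN_revN m N hN]
  constructor
  · intro hm
    simp only [specList, List.mem_map, List.mem_filter, List.mem_range] at hm
    obtain ⟨j, ⟨hjN, hkeep⟩, hbits⟩ := hm
    have hj : j = revN m N := bitsN_inj m j (revN m N) (by omega) (revN_lt m N) hbits
    subst hj
    exact ⟨hjN, hkeep⟩
  · intro ⟨h1, h2⟩
    simp only [specList, List.mem_map, List.mem_filter, List.mem_range]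
    exact ⟨revN m N, ⟨h1, h2⟩, rfl⟩

theorem stepA_spec (cuts : Int) (m N : Nat) (hN : N < 2 ^ m) :
    stepA cuts m (specList cuts m N) ((N : Nat) : Int) = specList cuts m (N + 1) := by
  have hw := whileA_eq m N (List.replicate m (0:Int)) 0 0 hN (by simp)
    (by intro t ht; simp at ht; exact List.eq_of_mem_replicate (by simpa using ht))
  simp only [stepA, hw, List.take_zero, List.nil_append, zero_add]
  rw [specList_succ]
  by_cases hsum : (bitsN N m).sum = cuts
  · by_cases hle : N ≤ revN m N
    · have hkeep : keepB cuts m N = true := by simp [keepB, hsum, hle]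
      have hcr : checkRepeat (specList cuts m N) (bitsN N m) = false := by
        by_cases hc : checkRepeat (specList cuts m N) (bitsN N m) = true
        · obtain ⟨h1, _⟩ := (checkRepeat_specList cuts m N hN).mp hc
          omega
        · simpa using hc
      simp [hcr, hsum, hkeep]
    · have hkeep : keepB cuts m N = false := by simp [keepB, hle]
      have hcr : checkRepeat (specList cuts m N) (bitsN N m) = true :=
        (checkRepeat_specList cuts m N hN).mpr
          ⟨by omega, by rw [keepB_revN cuts m N hN]; simp [hsum]; omega⟩
      simp [hcr, hkeep]
  · have hkeep : keepB cuts m N = false := by simp [keepB, hsum]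
    simp [hsum, hkeep]

theorem stepB_spec (cuts : Int) (m N : Nat) (hN : N < 2 ^ m) :
    stepB cuts m (specList cuts m N) ((N : Nat) : Int) = specList cuts m (N + 1) := by
  have hnn : 0 ≤ ofB ((bitsN N m).reverse) :=
    ofB_nonneg _ (fun b hb => bitsN_mem N m b (List.mem_reverse.mp hb))
  have hofb : ofB ((bitsN N m).reverse) = ((revN m N : Nat) : Int) := by
    unfold revN; omega
  simp only [stepB, innerB_eq m N 0 0 [] hN, zero_mul, zero_add, List.nil_append]
  rw [specList_succ, hofb]
  have hcond : (decide ((bitsN N m).sum = cuts) && decide ((N : Int) ≤ ((revN m N : Nat) : Int)))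
      = keepB cuts m N := by
    simp [keepB]
  rw [hcond]
  by_cases hk : keepB cuts m N = true <;> simp [hk]

theorem foldA_eq (cuts : Int) (m : Nat) : ∀ N : Nat, N ≤ 2 ^ m →
    (PySem.List.pyRange 0 (N : Int) 1).foldl (stepA cuts m) [] = specList cuts m N := by
  intro N
  induction N with
  | zero =>
      intro _
      rw [show ((0:Nat):Int) = 0 from rfl, PySem.List.pyRange_one_eq_nil (by omega)]
      simp [specList]
  | succ N ih =>
      intro hN
      have hc : (((N + 1 : Nat)) : Int) = (N : Int) + 1 := by push_cast; ring
      rw [hc, PySem.List.pyRange_one_succ_right (by omega : (0:Int) ≤ (N:Int)),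
        List.foldl_append, ih (by omega)]
      simpa using stepA_spec cuts m N (by omega)

theorem foldB_eq (cuts : Int) (m : Nat) : ∀ N : Nat, N ≤ 2 ^ m →
    (PySem.List.pyRange 0 (N : Int) 1).foldl (stepB cuts m) [] = specList cuts m N := by
  intro N
  induction N with
  | zero =>
      intro _
      rw [show ((0:Nat):Int) = 0 from rfl, PySem.List.pyRange_one_eq_nil (by omega)]
      simp [specList]
  | succ N ih =>
      intro hN
      have hc : (((N + 1 : Nat)) : Int) = (N : Int) + 1 := by push_cast; ring
      rw [hc, PySem.List.pyRange_one_succ_right (by omega : (0:Int) ≤ (N:Int)),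
        List.foldl_append, ih (by omega)]
      simpa using stepB_spec cuts m N (by omega)

-- ===== VERDICT (by name: the statement is the Claim_ definition above) =====
theorem getValid_spec : Claim_equal_getValid := by
  intro blocks cuts _hdom _hpre
  unfold Spec_getValid getValid getValid_alt
  have h2 : ((2:Int) ^ (blocks - 1).toNat) = ((2 ^ (blocks - 1).toNat : Nat) : Int) := by
    push_cast; ring
  simp only [h2, foldA_eq cuts _ _ (le_refl _), foldB_eq cuts _ _ (le_refl _)]
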